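-- pv_equiv track=rewrite | github.com/smartnic/superopt | measure/measure_mh_test_figure.py | gen_node_freq_map
-- ===== SOURCE A (Python) =====
-- def gen_node_freq_map(raw_nodes):
--     nodes_freq = {}
--     for n in raw_nodes:
--         if n in nodes_freq:
--             nodes_freq[n][0] += 1
--         else:
--             nodes_freq[n] = [1]
--     return nodes_freq
-- ===== SOURCE B (Python) =====
-- def gen_node_freq_map(raw_nodes):
--     # dedup to first-occurrence key order, then count each key by scanning the list
--     return {n: [raw_nodes.count(n)] for n in dict.fromkeys(raw_nodes)}
-- ===== Notes on version B (the rewrite author's own statement) =====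
-- stated objective: alternative
-- what changed: A tallies incrementally in one loop, mutating per-key one-element list cells behind a membership branch; B keeps no running tally at all: it first deduplicates the input to its distinct keys in first-occurrence order (dict.fromkeys) and then computes each key's frequency by an independent raw_nodes.count scan, trading A's O(n) incremental update for a scan-per-distinct-key formulation.
import Mathlib
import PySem

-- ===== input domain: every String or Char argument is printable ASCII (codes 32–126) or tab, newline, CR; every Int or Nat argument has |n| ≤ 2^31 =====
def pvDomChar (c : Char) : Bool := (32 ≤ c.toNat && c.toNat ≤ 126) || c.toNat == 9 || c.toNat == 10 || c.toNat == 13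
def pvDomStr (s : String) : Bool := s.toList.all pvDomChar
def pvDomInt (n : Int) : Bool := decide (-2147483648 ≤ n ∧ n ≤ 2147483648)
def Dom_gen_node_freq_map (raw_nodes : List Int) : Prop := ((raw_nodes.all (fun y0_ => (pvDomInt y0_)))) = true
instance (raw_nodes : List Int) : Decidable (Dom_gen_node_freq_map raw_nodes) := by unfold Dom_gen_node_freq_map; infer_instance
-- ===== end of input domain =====

-- B replaces A's single incremental-tally loop (mutable singleton-list cells behind a membership
-- branch) by dedup-then-count: distinct keys in first-occurrence order, each counted by its own
-- scan of the input (objective: alternative; not faster).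

-- ===== PORT A =====
-- one loop: if n in dict, increment cell [0] in place; else store a fresh [1]
def gen_node_freq_map (raw_nodes : List Int) : List (Int × List Int) :=
  (raw_nodes.foldl (fun d n =>
      if d.contains n then
        d.insert n (match d.getD n [] with | x :: t => (x + 1) :: t | [] => [])
      else
        d.insert n [1])
    PySem.Dict.empty).items

-- ===== PORT B =====
-- {n: [raw_nodes.count(n)] for n in dict.fromkeys(raw_nodes)}
def gen_node_freq_map_alt (raw_nodes : List Int) : List (Int × List Int) :=
  (PySem.List.dedup raw_nodes).map
    (fun n => (n, [((PySem.List.count raw_nodes n : Nat) : Int)]))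

-- ===== PRECONDITION & SPEC =====
def Spec_gen_node_freq_map (raw_nodes : List Int) (out : List (Int × List Int)) : Prop := out = gen_node_freq_map_alt raw_nodes
instance (raw_nodes : List Int) (out : List (Int × List Int)) : Decidable (Spec_gen_node_freq_map raw_nodes out) := by unfold Spec_gen_node_freq_map; infer_instance

-- ===== CLAIM (what is proved, stated in full; the proofs are below) =====
def Claim_equal_gen_node_freq_map : Prop := ∀ (raw_nodes : List Int), Dom_gen_node_freq_map raw_nodes → Spec_gen_node_freq_map raw_nodes (gen_node_freq_map raw_nodes)

-- ===== LEMMAS AND PROOFS =====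

-- dedup across appending one element: kept iff fresh
theorem pv_dedup_append_singleton (xs : List Int) (n : Int) :
    PySem.List.dedup (xs ++ [n])
      = if n ∈ xs then PySem.List.dedup xs else PySem.List.dedup xs ++ [n] := by
  simp only [PySem.List.dedup_eq_ofList, PySem.Set.ofList_eq_foldl, List.foldl_append,
    List.foldl_cons, List.foldl_nil]
  rw [show (List.foldl PySem.Set.add [] xs) = PySem.Set.ofList xs from
        (PySem.Set.ofList_eq_foldl xs).symm]
  unfold PySem.Set.add
  by_cases h : n ∈ xs
  · rw [if_pos h, if_pos]
    exact (PySem.Set.contains_iff _ _).mpr ((PySem.Set.mem_ofList _ _).mpr h)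
  · rw [if_neg h, if_neg]
    intro hc
    exact h ((PySem.Set.mem_ofList _ _).mp ((PySem.Set.contains_iff _ _).mp hc))

-- Invariant, by reverse induction: A's dict after the whole list equals B's dedup-and-count map.
theorem pv_fold_items (xs : List Int) :
    gen_node_freq_map xs
      = (PySem.List.dedup xs).map (fun k => (k, [((xs.count k : Nat) : Int)])) := by
  unfold gen_node_freq_map
  induction xs using List.reverseRecOn with
  | nil => rfl
  | append_singleton xs n ih =>
    rw [List.foldl_append, List.foldl_cons, List.foldl_nil]
    set D : PySem.Dict Int (List Int) := xs.foldl (fun d n =>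
        if d.contains n then
          d.insert n (match d.getD n [] with | x :: t => (x + 1) :: t | [] => [])
        else d.insert n [1]) PySem.Dict.empty with hD
    have hkeys : D.keys = PySem.List.dedup xs := by
      simp only [PySem.Dict.keys]
      rw [ih, List.map_map]
      simp [Function.comp_def]
    have hnd : D.keys.Nodup := by rw [hkeys]; exact PySem.List.nodup_dedup xs
    have hcont : D.contains n = decide (n ∈ xs) := by
      rw [PySem.Dict.contains_eq_decide_mem_keys, hkeys]
      simp
    rw [pv_dedup_append_singleton]
    by_cases hmem : n ∈ xs
    · -- seen before: A increments the cell; key set and order unchanged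
      have hc : D.contains n = true := by rw [hcont]; exact decide_eq_true hmem
      have hmemItems : (n, [((xs.count n : Nat) : Int)]) ∈ D.items := by
        rw [ih]
        exact List.mem_map.mpr ⟨n, (PySem.List.mem_dedup _ _).mpr hmem, rfl⟩
      have hgD : D.getD n [] = [((xs.count n : Nat) : Int)] :=
        PySem.Dict.getD_of_mem_items _ hmemItems hnd []
      rw [if_pos hc, hgD, PySem.Dict.items_insert_of_contains _ _ hc, if_pos hmem, ih,
        List.map_map]
      apply List.map_congr_left
      intro k hk
      by_cases hkn : k = n
      · subst hkn
        simp [List.count_append]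
      · simp only [Function.comp_apply]
        rw [if_neg (by simpa using hkn)]
        simp [List.count_append, Ne.symm hkn]
    · -- fresh key: appended with count 1
      have hc : D.contains n = false := by
        rw [hcont]; exact decide_eq_false hmem
      have hc' : ¬ (D.contains n = true) := by simp [hc]
      rw [if_neg hc', PySem.Dict.items_insert_of_not_contains _ _ hc,
        if_neg hmem, ih, List.map_append]
      congr 1
      · apply List.map_congr_left
        intro k hk
        have hkn : k ≠ n := fun h => hmem (h ▸ (PySem.List.mem_dedup _ _).mp hk)
        simp [List.count_append, Ne.symm hkn]
      · have h0 : xs.count n = 0 := List.count_eq_zero.mpr hmem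
        simp [List.count_append, h0]

-- ===== VERDICT (by name: the statement is the Claim_ definition above) =====
theorem gen_node_freq_map_spec : Claim_equal_gen_node_freq_map := by
  intro raw_nodes _
  show gen_node_freq_map raw_nodes = gen_node_freq_map_alt raw_nodes
  rw [pv_fold_items]
  unfold gen_node_freq_map_alt
  simp [PySem.List.count_eq]
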